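-- pv_equiv track=rewrite | github.com/IMPACT750/2Algo | Algo.py | parcours_optimal_naif
-- ===== SOURCE A (Python) =====
-- def parcours_optimal_naif(T, C, A, B):
--     memorisation = {}
--
--     def parcours_optimal_recursif(i, symbol_prec):
--         if i == 0:
--             return B * T[0]
--         if i in memorisation:
--             return memorisation[i]
--
--         max_gain = parcours_optimal_recursif(i - 1, symbol_prec)
--         for j in range(i):
--             if C[i] == C[j]:
--                 gain = parcours_optimal_recursif(j, symbol_prec) + A * T[i]
--             else:
--                 gain = parcours_optimal_recursif(j, symbol_prec) + B * T[i]
--             max_gain = max(max_gain, gain)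
--
--         memorisation[i] = max_gain
--         return max_gain
--
--     return parcours_optimal_recursif(len(T) - 1, None)
-- ===== SOURCE B (Python) =====
-- def parcours_optimal_naif(T, C, A, B):
--     # O(n) DP: f(i) = best gain ending considerations at i; the quadratic inner scan of the
--     # original is replaced by per-color last values plus the last index of a differing color
--     # (valid because f is nondecreasing, so the best predecessor of each kind is the latest one).
--     f = B * T[0]
--     bestc = {}          # color -> f value at its last occurrence among processed indices
--     lv = None           # f value at the last processed index
--     lc = None           # color of the last processed index
--     ov = None           # f value at the last processed index whose color differs from lc
--     for i in range(1, len(T)):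
--         c = C[i - 1]
--         if lc is None:
--             lv, lc = f, c
--         elif c == lc:
--             lv = f
--         else:
--             ov, lv, lc = lv, f, c
--         bestc[c] = f
--         g = f
--         if C[i] in bestc:
--             g = max(g, bestc[C[i]] + A * T[i])
--         d = lv if C[i] != lc else ov
--         if d is not None:
--             g = max(g, d + B * T[i])
--         f = g
--     return f
-- ===== Notes on version B (the rewrite author's own statement) =====
-- stated objective: faster
-- what changed: Replaced the memoized quadratic recursion (inner scan over all previous indices at each step) by a single forward pass keeping per-color best values in a dict plus the last value and the last differing-color value, exploiting that the DP value is nondecreasing in the index.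
import Mathlib
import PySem

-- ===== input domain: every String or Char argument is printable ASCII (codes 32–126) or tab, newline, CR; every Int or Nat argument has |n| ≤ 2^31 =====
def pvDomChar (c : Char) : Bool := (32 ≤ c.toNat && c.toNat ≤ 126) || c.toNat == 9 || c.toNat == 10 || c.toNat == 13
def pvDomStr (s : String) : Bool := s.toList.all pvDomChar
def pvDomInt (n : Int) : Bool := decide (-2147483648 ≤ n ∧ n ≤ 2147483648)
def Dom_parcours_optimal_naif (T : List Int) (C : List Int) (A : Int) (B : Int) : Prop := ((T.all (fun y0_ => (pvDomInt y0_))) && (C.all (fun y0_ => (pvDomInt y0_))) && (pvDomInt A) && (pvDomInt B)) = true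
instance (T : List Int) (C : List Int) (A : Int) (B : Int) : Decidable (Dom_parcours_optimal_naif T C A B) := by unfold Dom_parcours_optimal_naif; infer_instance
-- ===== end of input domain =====

-- B replaces A's memoized O(n^2) dynamic program by a one-pass dynamic program (per-color
-- running values in a dict plus the value at the last index of a differing color); objective: faster.

-- ===== PORT A =====
-- Python A: memoized recursion parcours_optimal_recursif(i) with an inner scan over j < i;
-- pvRecA is that recursion (threading the memo dict), pvLoopA its inner `for j in range(i)` loop.
-- T[0], T[i], C[i], C[j] are ported with pyGetD (in range on every input Pre_ admits).
mutual
def pvRecA (T C : List Int) (Aa Bb : Int) (i : Nat) (memo : PySem.Dict Int Int) : Int × PySem.Dict Int Int :=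
  if _h : i = 0 then (Bb * PySem.List.pyGetD T 0 0, memo)
  else
    match memo.get? (i : Int) with
    | some v => (v, memo)
    | none =>
      let p := pvRecA T C Aa Bb (i - 1) memo
      let q := pvLoopA T C Aa Bb i 0 p.1 p.2
      (q.1, q.2.insert (i : Int) q.1)
termination_by (i, 1, 0)

def pvLoopA (T C : List Int) (Aa Bb : Int) (i j : Nat) (mg : Int) (memo : PySem.Dict Int Int) : Int × PySem.Dict Int Int :=
  if _h : j < i then
    let p := pvRecA T C Aa Bb j memo
    let gain := if PySem.List.pyGetD C (i : Int) 0 = PySem.List.pyGetD C (j : Int) 0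
      then p.1 + Aa * PySem.List.pyGetD T (i : Int) 0
      else p.1 + Bb * PySem.List.pyGetD T (i : Int) 0
    pvLoopA T C Aa Bb i (j + 1) (max mg gain) p.2
  else (mg, memo)
termination_by (i, 0, i - j)
end

def parcours_optimal_naif (T : List Int) (C : List Int) (A : Int) (B : Int) : Int :=
  (pvRecA T C A B (T.length - 1) PySem.Dict.empty).1

-- B state: (f, bestc, lv, lc, ov)
def pvStB := Int × PySem.Dict Int Int × Option Int × Option Int × Option Int

def pvStepB (T C : List Int) (Aa Bb : Int) (st : pvStB) (i : Int) : pvStB :=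
  let f := st.1
  let c := PySem.List.pyGetD C (i - 1) 0
  let lco : Option Int × Option Int × Option Int :=
    match st.2.2.2.1 with
    | none => (some f, some c, st.2.2.2.2)
    | some l => if c = l then (some f, some l, st.2.2.2.2) else (some f, some c, st.2.2.1)
  let bestc := st.2.1.insert c f
  let ci := PySem.List.pyGetD C i 0
  let g1 := if bestc.contains ci then max f (bestc.getD ci 0 + Aa * PySem.List.pyGetD T i 0) else f
  let d : Option Int :=
    match lco.2.1 with
    | some l => if ci ≠ l then lco.1 else lco.2.2
    | none => lco.1
  let g2 := match d with
    | some dv => max g1 (dv + Bb * PySem.List.pyGetD T i 0)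
    | none => g1
  (g2, bestc, lco.1, lco.2.1, lco.2.2)

def parcours_optimal_naif_alt (T : List Int) (C : List Int) (A : Int) (B : Int) : Int :=
  ((PySem.List.pyRange 1 (PySem.List.len T) 1).foldl (pvStepB T C A B)
    (B * PySem.List.pyGetD T 0 0, PySem.Dict.empty, none, none, none)).1

-- ===== PRECONDITION & SPEC =====
-- Pre_ excludes exactly the inputs on which Python A raises: an empty T (the recursion starts at
-- i = -1 and never reaches the base case: RecursionError) and a C shorter than a T of length ≥ 2
-- (IndexError on C[i]).
def Pre_parcours_optimal_naif (T : List Int) (C : List Int) (_A : Int) (_B : Int) : Prop :=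
  T ≠ [] ∧ (T.length ≤ C.length ∨ T.length = 1)
instance (T : List Int) (C : List Int) (A : Int) (B : Int) : Decidable (Pre_parcours_optimal_naif T C A B) := by unfold Pre_parcours_optimal_naif; infer_instance

def pvWitness_parcours_optimal_naif : List Int × List Int × Int × Int := ([1, 2, 3], [1, 2, 1], 2, 3)

def Spec_parcours_optimal_naif (T : List Int) (C : List Int) (A : Int) (B : Int) (out : Int) : Prop := out = parcours_optimal_naif_alt T C A B
instance (T : List Int) (C : List Int) (A : Int) (B : Int) (out : Int) : Decidable (Spec_parcours_optimal_naif T C A B out) := by unfold Spec_parcours_optimal_naif; infer_instance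

-- ===== CLAIM (what is proved, stated in full; the proofs are below) =====
def Claim_equal_parcours_optimal_naif : Prop := ∀ (T : List Int) (C : List Int) (A : Int) (B : Int), Dom_parcours_optimal_naif T C A B → Pre_parcours_optimal_naif T C A B → Spec_parcours_optimal_naif T C A B (parcours_optimal_naif T C A B)

-- ===== LEMMAS AND PROOFS =====
-- ===== spec layer =====
def pvW (T C : List Int) (Aa Bb : Int) (i j : Nat) : Int :=
  (if C.getD i 0 = C.getD j 0 then Aa else Bb) * T.getD i 0

def pvTab (T C : List Int) (Aa Bb : Int) : Nat → List Int
  | 0 => [Bb * T.getD 0 0]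
  | i + 1 =>
    let vs := pvTab T C Aa Bb i
    vs ++ [(List.range (i + 1)).foldl
      (fun m j => max m (vs.getD j 0 + pvW T C Aa Bb (i + 1) j)) (vs.getD i 0)]

def pvG (T C : List Int) (Aa Bb : Int) (i : Nat) : Int := (pvTab T C Aa Bb i).getD i 0

theorem pvTab_length (T C : List Int) (Aa Bb : Int) (i : Nat) :
    (pvTab T C Aa Bb i).length = i + 1 := by
  induction i with
  | zero => rfl
  | succ i ih => simp [pvTab, ih]

theorem pvTab_getD (T C : List Int) (Aa Bb : Int) {i j : Nat} (h : j ≤ i) :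
    (pvTab T C Aa Bb i).getD j 0 = pvG T C Aa Bb j := by
  induction i with
  | zero => interval_cases j; rfl
  | succ i ih =>
    rcases Nat.lt_or_ge j (i + 1) with hj | hj
    · have : (pvTab T C Aa Bb (i+1)).getD j 0 = (pvTab T C Aa Bb i).getD j 0 := by
        simp only [pvTab]
        rw [List.getD_eq_getElem?_getD, List.getElem?_append_left (by rw [pvTab_length]; omega),
            ← List.getD_eq_getElem?_getD]
      rw [this, ih (by omega)]
    · have hj' : j = i + 1 := by omega
      subst hj'
      rfl

theorem pvG_succ (T C : List Int) (Aa Bb : Int) (i : Nat) :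
    pvG T C Aa Bb (i + 1) =
      (List.range (i + 1)).foldl
        (fun m j => max m (pvG T C Aa Bb j + pvW T C Aa Bb (i + 1) j)) (pvG T C Aa Bb i) := by
  have hX : pvG T C Aa Bb (i + 1) =
      (List.range (i + 1)).foldl
        (fun m j => max m ((pvTab T C Aa Bb i).getD j 0 + pvW T C Aa Bb (i + 1) j))
        ((pvTab T C Aa Bb i).getD i 0) := by
    show (pvTab T C Aa Bb (i+1)).getD (i+1) 0 = _
    simp only [pvTab]
    rw [List.getD_eq_getElem?_getD, List.getElem?_append_right (by rw [pvTab_length])]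
    simp [pvTab_length]
  rw [hX, pvTab_getD T C Aa Bb (Nat.le_refl i)]
  apply PySem.List.foldl_congr_mem
  intro acc j hj
  rw [pvTab_getD T C Aa Bb (Nat.lt_succ_iff.mp (List.mem_range.mp hj))]

theorem pvG_mono (T C : List Int) (Aa Bb : Int) {j k : Nat} (h : j ≤ k) :
    pvG T C Aa Bb j ≤ pvG T C Aa Bb k := by
  induction k with
  | zero => simp_all
  | succ k ih =>
    rcases Nat.lt_or_ge j (k + 1) with hj | hj
    · refine le_trans (ih (by omega)) ?_
      rw [pvG_succ]
      exact (PySem.List.le_foldl_max_int _ _ _).1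
    · have : j = k + 1 := by omega
      simp [this]

theorem pvG_bound (T C : List Int) (Aa Bb : Int) {i j : Nat} (h : j < i + 1) :
    pvG T C Aa Bb j + pvW T C Aa Bb (i + 1) j ≤ pvG T C Aa Bb (i + 1) := by
  rw [pvG_succ]
  exact (PySem.List.le_foldl_max_int _ _ _).2 j (List.mem_range.mpr h)

theorem pv_foldl_max_le {l : List Nat} {f : Nat → Int} {init R : Int}
    (h0 : init ≤ R) (h : ∀ x ∈ l, f x ≤ R) :
    l.foldl (fun m j => max m (f j)) init ≤ R := by
  induction l generalizing init with
  | nil => simpa using h0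
  | cons x t ih =>
    simp only [List.foldl_cons]
    exact ih (max_le h0 (h x (by simp))) (fun y hy => h y (by simp [hy]))

-- A-side memo invariant
def pvValid (T C : List Int) (Aa Bb : Int) (memo : PySem.Dict Int Int) : Prop :=
  ∀ k v, memo.get? k = some v → ∃ m : Nat, (m : Int) = k ∧ v = pvG T C Aa Bb m

theorem pvRecA_spec (T C : List Int) (Aa Bb : Int) :
    ∀ i memo, pvValid T C Aa Bb memo →
      (pvRecA T C Aa Bb i memo).1 = pvG T C Aa Bb i ∧
      pvValid T C Aa Bb (pvRecA T C Aa Bb i memo).2 := by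
  intro i
  induction i using Nat.strong_induction_on with
  | _ i IH =>
    intro memo hmemo
    match i with
    | 0 =>
      rw [pvRecA]
      simp [pvG, pvTab, PySem.List.pyGetD_zero, hmemo]
    | (n + 1) =>
      have hloop : ∀ d j mg memo', j + d = n + 1 → pvValid T C Aa Bb memo' →
          (pvLoopA T C Aa Bb (n + 1) j mg memo').1 =
            (List.range' j d).foldl
              (fun m k => max m (pvG T C Aa Bb k + pvW T C Aa Bb (n + 1) k)) mg ∧
          pvValid T C Aa Bb (pvLoopA T C Aa Bb (n + 1) j mg memo').2 := by
        intro d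
        induction d with
        | zero =>
          intro j mg memo' hj hv
          rw [pvLoopA]
          simp [show ¬ j < n + 1 by omega, hv]
        | succ d ihd =>
          intro j mg memo' hj hv
          rw [pvLoopA]
          have hjlt : j < n + 1 := by omega
          simp only [hjlt, dif_pos]
          have hrec := IH j (by omega) memo' hv
          have hstep := ihd (j + 1) (max mg ((pvRecA T C Aa Bb j memo').1 +
              pvW T C Aa Bb (n + 1) j)) (pvRecA T C Aa Bb j memo').2 (by omega) hrec.2
          rw [List.range'_succ]
          simp only [List.foldl_cons]
          rw [hrec.1] at hstep ⊢
          have hw : (if PySem.List.pyGetD C (↑(n + 1) : Int) 0 = PySem.List.pyGetD C (↑j : Int) 0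
              then pvG T C Aa Bb j + Aa * PySem.List.pyGetD T (↑(n + 1) : Int) 0
              else pvG T C Aa Bb j + Bb * PySem.List.pyGetD T (↑(n + 1) : Int) 0) =
              pvG T C Aa Bb j + pvW T C Aa Bb (n + 1) j := by
            simp only [PySem.List.pyGetD_natCast, pvW]
            split_ifs <;> ring
          rw [hw]
          exact hstep
      rw [pvRecA]
      simp only [Nat.succ_ne_zero, dite_false]
      cases hmo : memo.get? ((n + 1 : Nat) : Int) with
      | some v =>
        obtain ⟨m, hm, hv⟩ := hmemo _ _ hmo
        have : m = n + 1 := by exact_mod_cast hm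
        subst this
        exact ⟨by simp [hv], hmemo⟩
      | none =>
        simp only [Nat.add_sub_cancel]
        have hrec := IH n (by omega) memo hmemo
        have hq := hloop (n + 1) 0 (pvRecA T C Aa Bb n memo).1 (pvRecA T C Aa Bb n memo).2
          (by omega) hrec.2
        have hq1 : (pvLoopA T C Aa Bb (n + 1) 0 (pvRecA T C Aa Bb n memo).1
            (pvRecA T C Aa Bb n memo).2).1 = pvG T C Aa Bb (n + 1) := by
          rw [hq.1, hrec.1, pvG_succ, List.range_eq_range']
        have hv2 : pvValid T C Aa Bb
            ((pvLoopA T C Aa Bb (n + 1) 0 (pvRecA T C Aa Bb n memo).1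
              (pvRecA T C Aa Bb n memo).2).2.insert ((n + 1 : Nat) : Int)
              (pvLoopA T C Aa Bb (n + 1) 0 (pvRecA T C Aa Bb n memo).1
                (pvRecA T C Aa Bb n memo).2).1) := by
          intro k v hkv
          rw [PySem.Dict.get?_insert] at hkv
          split at hkv
          · rename_i hk
            exact ⟨n + 1, hk.symm, by simpa [hq1] using (Option.some_injective _ hkv).symm⟩
          · exact hq.2 _ _ hkv
        exact ⟨by simpa using hq1, by simpa using hv2⟩

-- ===== B-side spec =====
def pvLastC (C : List Int) : Nat → Int → Option Nat
  | 0, _ => none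
  | k + 1, c => if C.getD k 0 = c then some k else pvLastC C k c

def pvLastNe (C : List Int) : Nat → Option Nat
  | 0 => none
  | 1 => none
  | k + 2 => if C.getD (k + 1) 0 = C.getD k 0 then pvLastNe C (k + 1) else some k

theorem pvLastC_mem (C : List Int) {k : Nat} {c : Int} {m : Nat}
    (h : pvLastC C k c = some m) : m < k ∧ C.getD m 0 = c := by
  induction k with
  | zero => simp [pvLastC] at h
  | succ k ih =>
    rw [pvLastC] at h
    split at h
    · cases h
      exact ⟨by omega, by assumption⟩
    · have := ih h
      exact ⟨by omega, this.2⟩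

theorem pvLastC_last (C : List Int) {k j : Nat} {c : Int} (hj : j < k)
    (hc : C.getD j 0 = c) : ∃ m, pvLastC C k c = some m ∧ j ≤ m := by
  induction k with
  | zero => omega
  | succ k ih =>
    rw [pvLastC]
    by_cases h : C.getD k 0 = c
    · exact ⟨k, by rw [if_pos h], by omega⟩
    · have hjk : j < k := by
        rcases Nat.lt_or_ge j k with h' | h'
        · exact h'
        · have : j = k := by omega
          subst this
          exact absurd hc h
      obtain ⟨m, hm, hjm⟩ := ih hjk
      exact ⟨m, by rw [if_neg h, hm], hjm⟩

theorem pvLastNe_mem (C : List Int) {k m : Nat}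
    (h : pvLastNe C (k + 1) = some m) : m < k + 1 ∧ C.getD m 0 ≠ C.getD k 0 := by
  induction k with
  | zero => simp [pvLastNe] at h
  | succ k ih =>
    rw [pvLastNe] at h
    split at h
    · rename_i heq
      obtain ⟨h1, h2⟩ := ih h
      rw [heq]
      exact ⟨by omega, h2⟩
    · rename_i hne
      cases h
      exact ⟨by omega, fun hc => hne (by rw [hc])⟩

theorem pvLastNe_last (C : List Int) {k j : Nat} (hj : j < k + 1)
    (hc : C.getD j 0 ≠ C.getD k 0) :
    ∃ m, pvLastNe C (k + 1) = some m ∧ j ≤ m := by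
  induction k with
  | zero =>
    have : j = 0 := by omega
    subst this
    exact absurd rfl hc
  | succ k ih =>
    rw [pvLastNe]
    by_cases h : C.getD (k + 1) 0 = C.getD k 0
    · have hjk : j < k + 1 := by
        rcases Nat.lt_or_ge j (k + 1) with h' | h'
        · exact h'
        · have : j = k + 1 := by omega
          subst this
          exact absurd rfl hc
      rw [h] at hc
      obtain ⟨m, hm, hjm⟩ := ih hjk hc
      exact ⟨m, by rw [if_pos h, hm], hjm⟩
    · refine ⟨k, by rw [if_neg h], ?_⟩
      rcases Nat.lt_or_ge j (k + 1) with h' | h'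
      · omega
      · have : j = k + 1 := by omega
        subst this
        exact absurd rfl hc

def pvSameCand (T C : List Int) (Aa Bb : Int) (k : Nat) : Int :=
  match pvLastC C (k + 1) (C.getD (k + 1) 0) with
  | some m => max (pvG T C Aa Bb k) (pvG T C Aa Bb m + Aa * T.getD (k + 1) 0)
  | none => pvG T C Aa Bb k

def pvDOpt (C : List Int) (k : Nat) : Option Nat :=
  if C.getD (k + 1) 0 = C.getD k 0 then pvLastNe C (k + 1) else some k

def pvFastRHS (T C : List Int) (Aa Bb : Int) (k : Nat) : Int :=
  match pvDOpt C k with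
  | some m => max (pvSameCand T C Aa Bb k) (pvG T C Aa Bb m + Bb * T.getD (k + 1) 0)
  | none => pvSameCand T C Aa Bb k

theorem pvSameCand_le (T C : List Int) (Aa Bb : Int) (k : Nat)
    (h : pvG T C Aa Bb k ≤ pvG T C Aa Bb (k + 1))
    (h2 : ∀ m, pvLastC C (k + 1) (C.getD (k + 1) 0) = some m →
      pvG T C Aa Bb m + Aa * T.getD (k + 1) 0 ≤ pvG T C Aa Bb (k + 1)) :
    pvSameCand T C Aa Bb k ≤ pvG T C Aa Bb (k + 1) := by
  unfold pvSameCand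
  cases hlc : pvLastC C (k + 1) (C.getD (k + 1) 0) with
  | none => exact h
  | some m => exact max_le h (h2 m hlc)

theorem pvG_fast (T C : List Int) (Aa Bb : Int) (k : Nat) :
    pvG T C Aa Bb (k + 1) = pvFastRHS T C Aa Bb k := by
  apply le_antisymm
  · -- fold ≤ RHS
    rw [pvG_succ]
    have hbase_s : pvG T C Aa Bb k ≤ pvSameCand T C Aa Bb k := by
      unfold pvSameCand
      cases pvLastC C (k + 1) (C.getD (k + 1) 0) with
      | none => exact le_refl _
      | some m => exact le_max_left _ _
    have hs_rhs : pvSameCand T C Aa Bb k ≤ pvFastRHS T C Aa Bb k := by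
      unfold pvFastRHS
      cases pvDOpt C k with
      | none => exact le_refl _
      | some m => exact le_max_left _ _
    apply pv_foldl_max_le (le_trans hbase_s hs_rhs)
    intro j hj
    have hjlt : j < k + 1 := List.mem_range.mp hj
    by_cases heq : C.getD (k + 1) 0 = C.getD j 0
    · -- same color: goes through pvSameCand
      obtain ⟨m, hm, hjm⟩ := pvLastC_last C hjlt heq.symm
      have hcand : pvG T C Aa Bb j + pvW T C Aa Bb (k + 1) j ≤ pvSameCand T C Aa Bb k := by
        unfold pvSameCand
        rw [hm, pvW, if_pos heq]
        exact le_max_of_le_right (by have := pvG_mono T C Aa Bb hjm; omega)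
      exact le_trans hcand hs_rhs
    · -- different color: goes through pvDOpt
      have hW : pvW T C Aa Bb (k + 1) j = Bb * T.getD (k + 1) 0 := by
        rw [pvW, if_neg heq]
      obtain ⟨m, hm, hjm⟩ : ∃ m, pvDOpt C k = some m ∧ j ≤ m := by
        unfold pvDOpt
        by_cases hcc : C.getD (k + 1) 0 = C.getD k 0
        · rw [if_pos hcc]
          refine pvLastNe_last C hjlt ?_
          rw [← hcc]
          exact fun hx => heq hx.symm
        · rw [if_neg hcc]
          exact ⟨k, rfl, by omega⟩
      unfold pvFastRHS
      rw [hm, hW]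
      exact le_max_of_le_right (by have := pvG_mono T C Aa Bb hjm; omega)
  · -- RHS ≤ pvG (k+1)
    have hmono := pvG_mono T C Aa Bb (Nat.le_succ k)
    have hsame : pvSameCand T C Aa Bb k ≤ pvG T C Aa Bb (k + 1) := by
      refine pvSameCand_le T C Aa Bb k hmono ?_
      intro m hm
      obtain ⟨hmlt, hmc⟩ := pvLastC_mem C hm
      have := pvG_bound T C Aa Bb hmlt
      rwa [pvW, if_pos hmc.symm] at this
    unfold pvFastRHS
    cases hd : pvDOpt C k with
    | none => exact hsame
    | some m =>
      refine max_le hsame ?_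
      have hprops : m < k + 1 ∧ C.getD (k + 1) 0 ≠ C.getD m 0 := by
        unfold pvDOpt at hd
        by_cases hcc : C.getD (k + 1) 0 = C.getD k 0
        · rw [if_pos hcc] at hd
          obtain ⟨h1, h2⟩ := pvLastNe_mem C hd
          exact ⟨h1, by rw [hcc]; exact fun hx => h2 hx.symm⟩
        · rw [if_neg hcc] at hd
          cases hd
          exact ⟨by omega, hcc⟩
      have := pvG_bound T C Aa Bb hprops.1
      rwa [pvW, if_neg hprops.2] at this

theorem pvLastNe_succ2 (C : List Int) (k : Nat) :
    pvLastNe C (k + 1 + 1) =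
      if C.getD (k + 1) 0 = C.getD k 0 then pvLastNe C (k + 1) else some k := rfl

def pvInv (T C : List Int) (Aa Bb : Int) (k : Nat) (st : pvStB) : Prop :=
  st.1 = pvG T C Aa Bb k ∧
  (∀ c, st.2.1.get? c = (pvLastC C k c).map (pvG T C Aa Bb)) ∧
  st.2.2.1 = some (pvG T C Aa Bb (k - 1)) ∧
  st.2.2.2.1 = some (C.getD (k - 1) 0) ∧
  st.2.2.2.2 = (pvLastNe C k).map (pvG T C Aa Bb)

theorem pvStepB_inv (T C : List Int) (Aa Bb : Int) (k : Nat) (hk : 1 ≤ k) (st : pvStB)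
    (h : pvInv T C Aa Bb k st) :
    pvInv T C Aa Bb (k + 1) (pvStepB T C Aa Bb st ((k + 1 : Nat) : Int)) := by
  obtain ⟨f, bestc, lv, lc, ov⟩ := st
  obtain ⟨hf, hbc, hlv, hlc, hov⟩ := h
  simp only at hf hbc hlv hlc hov
  subst hf hlv hlc hov
  have hi1 : ((k + 1 : Nat) : Int) - 1 = ((k : Nat) : Int) := by push_cast; ring
  simp only [pvStepB, hi1, PySem.List.pyGetD_natCast]
  obtain ⟨k', rfl⟩ : ∃ k'', k = k'' + 1 := ⟨k - 1, by omega⟩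
  simp only [Nat.add_sub_cancel]
  have hbc' : ∀ c', (bestc.insert (C.getD (k' + 1) 0) (pvG T C Aa Bb (k' + 1))).get? c' =
      (pvLastC C (k' + 1 + 1) c').map (pvG T C Aa Bb) := by
    intro c'
    rw [PySem.Dict.get?_insert, pvLastC]
    by_cases h' : c' = C.getD (k' + 1) 0
    · rw [if_pos h', if_pos h'.symm]
      rfl
    · rw [if_neg h', if_neg (fun hx => h' hx.symm), hbc c']
  by_cases hcc : C.getD (k' + 1) 0 = C.getD k' 0
  · simp only [if_pos hcc]
    have hsame : (if (bestc.insert (C.getD (k' + 1) 0) (pvG T C Aa Bb (k' + 1))).contains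
          (C.getD (k' + 1 + 1) 0) = true then
        max (pvG T C Aa Bb (k' + 1))
          ((bestc.insert (C.getD (k' + 1) 0) (pvG T C Aa Bb (k' + 1))).getD (C.getD (k' + 1 + 1) 0) 0 +
            Aa * T.getD (k' + 1 + 1) 0)
      else pvG T C Aa Bb (k' + 1)) = pvSameCand T C Aa Bb (k' + 1) := by
      unfold pvSameCand
      cases hlc2 : pvLastC C (k' + 1 + 1) (C.getD (k' + 1 + 1) 0) with
      | none =>
        have hcf : (bestc.insert (C.getD (k' + 1) 0) (pvG T C Aa Bb (k' + 1))).contains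
            (C.getD (k' + 1 + 1) 0) = false := by
          rw [PySem.Dict.contains_eq_isSome_get?, hbc', hlc2]
          rfl
        rw [hcf]
        simp
      | some m =>
        have hct : (bestc.insert (C.getD (k' + 1) 0) (pvG T C Aa Bb (k' + 1))).contains
            (C.getD (k' + 1 + 1) 0) = true := by
          rw [PySem.Dict.contains_eq_isSome_get?, hbc', hlc2]
          rfl
        have hgd : (bestc.insert (C.getD (k' + 1) 0) (pvG T C Aa Bb (k' + 1))).getD
            (C.getD (k' + 1 + 1) 0) 0 = pvG T C Aa Bb m := by
          rw [PySem.Dict.getD_eq_get?_getD, hbc', hlc2]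
          rfl
        rw [hct, hgd]
        simp
    refine ⟨?_, fun c' => hbc' c', rfl, by simp only [Nat.add_sub_cancel]; rw [← hcc], ?_⟩
    · -- value component
      show _ = pvG T C Aa Bb (k' + 1 + 1)
      rw [pvG_fast T C Aa Bb (k' + 1)]
      unfold pvFastRHS pvDOpt
      by_cases hci : C.getD (k' + 1 + 1) 0 = C.getD k' 0
      · simp only [if_neg (not_not_intro hci), if_pos (hcc ▸ hci : C.getD (k' + 1 + 1) 0 = C.getD (k' + 1) 0)]
        rw [pvLastNe_succ2, if_pos hcc]
        cases hne : pvLastNe C (k' + 1) with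
        | none => simpa using hsame
        | some m => simpa using congrArg (fun z => max z (pvG T C Aa Bb m + Bb * T.getD (k' + 1 + 1) 0)) hsame
      · have hci2 : ¬ C.getD (k' + 1 + 1) 0 = C.getD (k' + 1) 0 := by
          rw [hcc]; exact hci
        simp only [if_pos hci, if_neg hci2]
        simpa using congrArg (fun z => max z (pvG T C Aa Bb (k' + 1) + Bb * T.getD (k' + 1 + 1) 0)) hsame
    · show Option.map (pvG T C Aa Bb) (pvLastNe C (k' + 1)) = _
      rw [pvLastNe_succ2, if_pos hcc]
  · simp only [if_neg hcc]
    have hsame : (if (bestc.insert (C.getD (k' + 1) 0) (pvG T C Aa Bb (k' + 1))).contains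
          (C.getD (k' + 1 + 1) 0) = true then
        max (pvG T C Aa Bb (k' + 1))
          ((bestc.insert (C.getD (k' + 1) 0) (pvG T C Aa Bb (k' + 1))).getD (C.getD (k' + 1 + 1) 0) 0 +
            Aa * T.getD (k' + 1 + 1) 0)
      else pvG T C Aa Bb (k' + 1)) = pvSameCand T C Aa Bb (k' + 1) := by
      unfold pvSameCand
      cases hlc2 : pvLastC C (k' + 1 + 1) (C.getD (k' + 1 + 1) 0) with
      | none =>
        have hcf : (bestc.insert (C.getD (k' + 1) 0) (pvG T C Aa Bb (k' + 1))).contains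
            (C.getD (k' + 1 + 1) 0) = false := by
          rw [PySem.Dict.contains_eq_isSome_get?, hbc', hlc2]
          rfl
        rw [hcf]
        simp
      | some m =>
        have hct : (bestc.insert (C.getD (k' + 1) 0) (pvG T C Aa Bb (k' + 1))).contains
            (C.getD (k' + 1 + 1) 0) = true := by
          rw [PySem.Dict.contains_eq_isSome_get?, hbc', hlc2]
          rfl
        have hgd : (bestc.insert (C.getD (k' + 1) 0) (pvG T C Aa Bb (k' + 1))).getD
            (C.getD (k' + 1 + 1) 0) 0 = pvG T C Aa Bb m := by
          rw [PySem.Dict.getD_eq_get?_getD, hbc', hlc2]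
          rfl
        rw [hct, hgd]
        simp
    refine ⟨?_, fun c' => hbc' c', rfl, by simp only [Nat.add_sub_cancel], ?_⟩
    · show _ = pvG T C Aa Bb (k' + 1 + 1)
      rw [pvG_fast T C Aa Bb (k' + 1)]
      unfold pvFastRHS pvDOpt
      by_cases hci : C.getD (k' + 1 + 1) 0 = C.getD (k' + 1) 0
      · simp only [if_neg (not_not_intro hci), if_pos hci]
        rw [pvLastNe_succ2, if_neg hcc]
        simpa using congrArg (fun z => max z (pvG T C Aa Bb k' + Bb * T.getD (k' + 1 + 1) 0)) hsame
      · simp only [if_pos hci, if_neg hci]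
        simpa using congrArg (fun z => max z (pvG T C Aa Bb (k' + 1) + Bb * T.getD (k' + 1 + 1) 0)) hsame
    · show some (pvG T C Aa Bb k') = _
      rw [pvLastNe_succ2, if_neg hcc]
      rfl

theorem pvG_zero (T C : List Int) (Aa Bb : Int) :
    Bb * PySem.List.pyGetD T 0 0 = pvG T C Aa Bb 0 := by
  simp [pvG, pvTab, PySem.List.pyGetD_zero]

theorem pvInit_inv (T C : List Int) (Aa Bb : Int) :
    pvInv T C Aa Bb 1 (pvStepB T C Aa Bb
      (Bb * PySem.List.pyGetD T 0 0, PySem.Dict.empty, none, none, none) ((1 : Nat) : Int)) := by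
  have h10 : ((1 : Nat) : Int) - 1 = ((0 : Nat) : Int) := by norm_num
  have h11 : ((1 : Nat) : Int) = ((1 : Nat) : Int) := rfl
  simp only [pvStepB, h10, PySem.List.pyGetD_natCast, pvG_zero T C Aa Bb]
  have hbc' : ∀ c', (PySem.Dict.empty.insert (C.getD 0 0) (pvG T C Aa Bb 0)).get? c' =
      (pvLastC C 1 c').map (pvG T C Aa Bb) := by
    intro c'
    rw [PySem.Dict.get?_insert]
    show _ = ((if C.getD 0 0 = c' then some 0 else pvLastC C 0 c').map (pvG T C Aa Bb))
    by_cases h' : c' = C.getD 0 0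
    · rw [if_pos h', if_pos h'.symm]
      rfl
    · rw [if_neg h', if_neg (fun hx => h' hx.symm), PySem.Dict.get?_empty]
      rfl
  have hsame : (if (PySem.Dict.empty.insert (C.getD 0 0) (pvG T C Aa Bb 0)).contains
        (C.getD 1 0) = true then
      max (pvG T C Aa Bb 0)
        ((PySem.Dict.empty.insert (C.getD 0 0) (pvG T C Aa Bb 0)).getD (C.getD 1 0) 0 +
          Aa * T.getD 1 0)
    else pvG T C Aa Bb 0) = pvSameCand T C Aa Bb 0 := by
    unfold pvSameCand
    cases hlc2 : pvLastC C 1 (C.getD 1 0) with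
    | none =>
      have hcf : (PySem.Dict.empty.insert (C.getD 0 0) (pvG T C Aa Bb 0)).contains
          (C.getD 1 0) = false := by
        rw [PySem.Dict.contains_eq_isSome_get?, hbc', hlc2]
        rfl
      rw [hcf]
      simp
    | some m =>
      have hct : (PySem.Dict.empty.insert (C.getD 0 0) (pvG T C Aa Bb 0)).contains
          (C.getD 1 0) = true := by
        rw [PySem.Dict.contains_eq_isSome_get?, hbc', hlc2]
        rfl
      have hgd : (PySem.Dict.empty.insert (C.getD 0 0) (pvG T C Aa Bb 0)).getD
          (C.getD 1 0) 0 = pvG T C Aa Bb m := by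
        rw [PySem.Dict.getD_eq_get?_getD, hbc', hlc2]
        rfl
      rw [hct, hgd]
      simp [show (0 : Nat) + 1 = 1 from rfl]
  refine ⟨?_, fun c' => hbc' c', rfl, rfl, rfl⟩
  show _ = pvG T C Aa Bb 1
  rw [show (1 : Nat) = 0 + 1 from rfl, pvG_fast T C Aa Bb 0]
  unfold pvFastRHS pvDOpt
  simp only [Nat.zero_add]
  rw [hsame]
  by_cases hci : C.getD 1 0 = C.getD 0 0
  · rw [if_neg (not_not_intro hci), if_pos hci]
    cases hne : pvLastNe C 1 with
    | none => rfl
    | some m => simp [pvLastNe] at hne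
  · rw [if_pos hci, if_neg hci]

theorem pvFold_inv (T C : List Int) (Aa Bb : Int) :
    ∀ m : Nat, 1 ≤ m →
      pvInv T C Aa Bb m ((PySem.List.pyRange 1 ((m : Int) + 1) 1).foldl (pvStepB T C Aa Bb)
        (Bb * PySem.List.pyGetD T 0 0, PySem.Dict.empty, none, none, none)) := by
  intro m hm
  induction m with
  | zero => omega
  | succ m ih =>
    rw [PySem.List.pyRange_one_succ_right (by omega), List.foldl_append]
    cases Nat.eq_zero_or_pos m with
    | inl h0 =>
      subst h0
      have : PySem.List.pyRange 1 ((0 + 1 : Nat) : Int) 1 = [] :=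
        PySem.List.pyRange_one_eq_nil (by omega)
      rw [this]
      simpa using pvInit_inv T C Aa Bb
    | inr hpos =>
      have hih := ih hpos
      have harg : ((m : Int) + 1) = ((m + 1 : Nat) : Int) := by push_cast; ring
      rw [harg] at hih
      simpa using pvStepB_inv T C Aa Bb m hpos _ hih

theorem pv_main (T C : List Int) (A B : Int) :
    parcours_optimal_naif T C A B = parcours_optimal_naif_alt T C A B := by
  have hempty : pvValid T C A B PySem.Dict.empty := by
    intro k v h
    rw [PySem.Dict.get?_empty] at h
    cases h
  have hA := (pvRecA_spec T C A B (T.length - 1) _ hempty).1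
  unfold parcours_optimal_naif parcours_optimal_naif_alt
  rw [hA]
  match hn : T.length with
  | 0 =>
    rw [show PySem.List.len T = ((0 : Nat) : Int) by simp [hn]]
    rw [PySem.List.pyRange_one_eq_nil (by omega)]
    simp [pvG_zero T C A B]
  | 1 =>
    rw [show PySem.List.len T = ((1 : Nat) : Int) by simp [hn]]
    rw [PySem.List.pyRange_one_eq_nil (by omega)]
    simp [pvG_zero T C A B]
  | (m + 2) =>
    rw [show PySem.List.len T = ((m + 1 : Nat) : Int) + 1 by rw [PySem.List.len_eq, hn]; push_cast; ring]
    simpa using (pvFold_inv T C A B (m + 1) (by omega)).1.symm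

-- ===== VERDICT (by name: the statement is the Claim_ definition above) =====
theorem parcours_optimal_naif_spec : Claim_equal_parcours_optimal_naif := by
  intro T C A B _hDom _hPre
  unfold Spec_parcours_optimal_naif
  exact pv_main T C A B
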